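-- pv_equiv track=rewrite | github.com/jhchoi316/Python_Algorithm | Programmers/Lv3-최고의집합.py | solution
-- ===== SOURCE A (Python) =====
-- def solution(n, s):
--     answer = []
--
--     if s < n:
--         return [-1]
--
--     quotient = s // n
--     remain = s % n
--
--     for i in range(n):
--         answer.append(quotient)
--
--     if remain != 0:
--         for i in range(len(answer)):
--             answer[i] += 1
--             remain -= 1
--             if remain == 0:
--                 break
--
--     answer.sort()
--     return answer
-- ===== SOURCE B (Python) =====
-- def solution(n, s):
--     if s < n:
--         return [-1]
--     out = []
--     while n > 0:
--         q = s // n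
--         out.append(q)
--         s -= q
--         n -= 1
--     return out
-- ===== Notes on version B (the rewrite author's own statement) =====
-- stated objective: alternative
-- what changed: B is a greedy one-at-a-time construction: it repeatedly emits s//n (the minimum of an optimal multiset) and recurses on (n-1, s - s//n), instead of A's fill-with-quotient pass, remainder-distribution pass with break, and final sort.
import Mathlib
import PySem

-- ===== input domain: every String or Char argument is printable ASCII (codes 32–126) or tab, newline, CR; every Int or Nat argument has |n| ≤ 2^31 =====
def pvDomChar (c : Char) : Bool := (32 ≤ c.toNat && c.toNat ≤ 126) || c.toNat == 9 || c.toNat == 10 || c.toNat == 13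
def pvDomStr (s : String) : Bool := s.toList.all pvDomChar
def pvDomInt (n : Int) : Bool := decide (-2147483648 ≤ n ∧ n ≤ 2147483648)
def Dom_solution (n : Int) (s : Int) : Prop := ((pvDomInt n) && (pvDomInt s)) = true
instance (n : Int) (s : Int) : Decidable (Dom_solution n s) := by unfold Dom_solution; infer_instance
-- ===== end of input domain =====

-- B replaces A's fill/remainder-distribution/sort with a greedy loop that at each
-- step emits s//n (the minimum of an optimal multiset) and continues on (n-1, s - s//n).

-- ===== PORT A =====
-- the 'for i in range(len(answer)): answer[i] += 1; remain -= 1; if remain == 0: break'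
-- loop: walk the list from the front, incrementing and counting down, stopping at 0
def pvIncLoop : List Int → Int → List Int
  | [], _ => []
  | x :: xs, r =>
    let x' := x + 1
    let r' := r - 1
    if r' == 0 then x' :: xs else x' :: pvIncLoop xs r'

def solution (n : Int) (s : Int) : List Int :=
  if s < n then [-1]
  else
    let quotient := PySem.Int.floordiv s n
    let remain := PySem.Int.mod s n
    let answer := (PySem.List.pyRange 0 n 1).foldl (fun acc _ => acc ++ [quotient]) []
    let answer := if remain ≠ 0 then pvIncLoop answer remain else answer
    PySem.List.sorted answer (fun x => x) false

-- ===== PORT B =====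
-- the 'while n > 0: q = s // n; out.append(q); s -= q; n -= 1' loop
def pvGreedy (n : Int) (s : Int) (acc : List Int) : List Int :=
  if h : 0 < n then
    let q := PySem.Int.floordiv s n
    pvGreedy (n - 1) (s - q) (acc ++ [q])
  else acc
termination_by n.toNat
decreasing_by omega

def solution_alt (n : Int) (s : Int) : List Int :=
  if s < n then [-1]
  else pvGreedy n s []

-- ===== PRECONDITION & SPEC =====
-- Pre_ excludes exactly n = 0 with 0 ≤ s, where A raises ZeroDivisionError at s // n.
def Pre_solution (n : Int) (s : Int) : Prop := n ≠ 0 ∨ s < n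
instance (n : Int) (s : Int) : Decidable (Pre_solution n s) := by unfold Pre_solution; infer_instance
def pvWitness_solution : Int × Int := (5, 17)
def Spec_solution (n : Int) (s : Int) (out : List Int) : Prop := out = solution_alt n s
instance (n : Int) (s : Int) (out : List Int) : Decidable (Spec_solution n s out) := by unfold Spec_solution; infer_instance

-- ===== CLAIM (what is proved, stated in full; the proofs are below) =====
def Claim_equal_solution : Prop := ∀ (n : Int) (s : Int), Dom_solution n s → Pre_solution n s → Spec_solution n s (solution n s)

-- ===== LEMMAS AND PROOFS =====

theorem pvIncLoop_replicate (q : Int) : ∀ (k : Nat) (r : Int), 0 < r → r.toNat ≤ k →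
    pvIncLoop (List.replicate k q) r =
      List.replicate r.toNat (q + 1) ++ List.replicate (k - r.toNat) q := by
  intro k
  induction k with
  | zero => intro r hr hle; omega
  | succ m ih =>
    intro r hr hle
    rw [List.replicate_succ, pvIncLoop]
    by_cases h1 : r - 1 = 0
    · have : r = 1 := by omega
      subst this
      simp
    · rw [if_neg (by simpa using h1), ih (r - 1) (by omega) (by omega)]
      have h2 : r.toNat = (r - 1).toNat + 1 := by omega
      rw [h2, List.replicate_succ]
      simp [List.cons_append]

theorem pvFill_eq_replicate (n : Int) (q : Int) :
    (PySem.List.pyRange 0 n 1).foldl (fun acc _ => acc ++ [q]) [] = List.replicate n.toNat q := by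
  rw [PySem.List.foldl_append_singleton_eq_map]
  simp [List.map_const', PySem.List.length_pyRange_one]

theorem pvPairwise_two_blocks (a b : Nat) (q : Int) :
    (List.replicate a q ++ List.replicate b (q + 1)).Pairwise (fun x y => x ≤ y) := by
  rw [List.pairwise_append]
  refine ⟨List.pairwise_replicate.2 (Or.inr le_rfl), List.pairwise_replicate.2 (Or.inr le_rfl), ?_⟩
  intro x hx y hy
  rw [List.eq_of_mem_replicate hx, List.eq_of_mem_replicate hy]
  omega

-- A's value, in closed form: (n - s%n) copies of s//n then s%n copies of s//n + 1
theorem pvA_closed (n s : Int) (hpos : 0 < n) (hle : n ≤ s) :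
    solution n s = List.replicate (n - PySem.Int.mod s n).toNat (PySem.Int.floordiv s n)
      ++ List.replicate (PySem.Int.mod s n).toNat (PySem.Int.floordiv s n + 1) := by
  unfold solution
  rw [if_neg (by omega)]
  simp only []
  set q := PySem.Int.floordiv s n with hq
  set r := PySem.Int.mod s n with hr
  rw [pvFill_eq_replicate]
  have hge : 0 ≤ r := PySem.Int.mod_nonneg s hpos
  have hltn : r < n := PySem.Int.mod_lt s hpos
  by_cases hr0 : r = 0
  · rw [if_neg (by simp [hr0])]
    rw [PySem.List.sorted_eq_self_of_pairwise _ _ (List.pairwise_replicate.2 (Or.inr le_rfl))]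
    simp [hr0]
  · rw [if_pos hr0]
    rw [pvIncLoop_replicate q n.toNat r (by omega) (by omega)]
    have hperm : (List.replicate (n - r).toNat q ++ List.replicate r.toNat (q + 1)).Perm
        (List.replicate r.toNat (q + 1) ++ List.replicate (n.toNat - r.toNat) q) := by
      have : (n - r).toNat = n.toNat - r.toNat := by omega
      rw [this]
      exact List.perm_append_comm
    exact PySem.List.sorted_id_eq_of_perm_of_pairwise _ _ hperm (pvPairwise_two_blocks _ _ q)

-- quotient/remainder of the next greedy step: s - s//n divided by n - 1
theorem pvStep (n s : Int) (h2 : 2 ≤ n) (hle : n ≤ s) :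
    (PySem.Int.mod s n < n - 1 →
      PySem.Int.floordiv (s - PySem.Int.floordiv s n) (n - 1) = PySem.Int.floordiv s n ∧
      PySem.Int.mod (s - PySem.Int.floordiv s n) (n - 1) = PySem.Int.mod s n) ∧
    (PySem.Int.mod s n = n - 1 →
      PySem.Int.floordiv (s - PySem.Int.floordiv s n) (n - 1) = PySem.Int.floordiv s n + 1 ∧
      PySem.Int.mod (s - PySem.Int.floordiv s n) (n - 1) = 0) := by
  set q := PySem.Int.floordiv s n with hq
  set r := PySem.Int.mod s n with hr
  have hsum : q * n + r = s := PySem.Int.floordiv_mul_add_mod s n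
  have hge : 0 ≤ r := PySem.Int.mod_nonneg s (by omega)
  have hltn : r < n := PySem.Int.mod_lt s (by omega)
  have hsum' : PySem.Int.floordiv (s - q) (n - 1) * (n - 1) + PySem.Int.mod (s - q) (n - 1) = s - q :=
    PySem.Int.floordiv_mul_add_mod (s - q) (n - 1)
  constructor
  · intro hcase
    have hfd : PySem.Int.floordiv (s - q) (n - 1) = q := by
      rw [PySem.Int.floordiv_eq_iff_of_pos (show (0:Int) < n - 1 by omega)]
      have e1 : q * (n - 1) = q * n - q := by ring
      have e2 : (q + 1) * (n - 1) = q * n + n - q - 1 := by ring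
      omega
    refine ⟨hfd, ?_⟩
    rw [hfd] at hsum'
    have e1 : q * (n - 1) = q * n - q := by ring
    omega
  · intro hcase
    have hfd : PySem.Int.floordiv (s - q) (n - 1) = q + 1 := by
      rw [PySem.Int.floordiv_eq_iff_of_pos (show (0:Int) < n - 1 by omega)]
      have e1 : (q + 1) * (n - 1) = q * n + n - q - 1 := by ring
      have e2 : (q + 1 + 1) * (n - 1) = q * n + 2 * n - q - 2 := by ring
      omega
    refine ⟨hfd, ?_⟩
    rw [hfd] at hsum'
    have e1 : (q + 1) * (n - 1) = q * n + n - q - 1 := by ring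
    omega

-- the greedy loop, in the same closed form, for n = m+1 ≥ 1
theorem pvGreedy_closed : ∀ (m : Nat) (s : Int) (acc : List Int), (m : Int) + 1 ≤ s →
    pvGreedy ((m : Int) + 1) s acc =
      acc ++ (List.replicate (((m : Int) + 1) - PySem.Int.mod s ((m : Int) + 1)).toNat
                (PySem.Int.floordiv s ((m : Int) + 1))
        ++ List.replicate ((PySem.Int.mod s ((m : Int) + 1)).toNat)
                (PySem.Int.floordiv s ((m : Int) + 1) + 1)) := by
  intro m
  induction m with
  | zero =>
    intro s acc hs
    rw [pvGreedy, dif_pos (by omega), pvGreedy, dif_neg (by omega)]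
    have hfd : PySem.Int.floordiv s 1 = s := by
      rw [PySem.Int.floordiv_eq_iff_of_pos (show (0:Int) < 1 by omega)]; omega
    have hmod : PySem.Int.mod s 1 = 0 := by
      have := PySem.Int.mod_nonneg s (show (0:Int) < 1 by omega)
      have := PySem.Int.mod_lt s (show (0:Int) < 1 by omega)
      omega
    simp only [Nat.cast_zero, zero_add] at *
    rw [hfd, hmod]
    simp
  | succ m ih =>
    intro s acc hs
    push_cast at hs ⊢
    have h2 : (2 : Int) ≤ (m : Int) + 1 + 1 := by omega
    rw [pvGreedy, dif_pos (by omega)]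
    simp only []
    set n : Int := (m : Int) + 1 + 1 with hn
    set q := PySem.Int.floordiv s n with hq
    set r := PySem.Int.mod s n with hr
    have hsum : q * n + r = s := PySem.Int.floordiv_mul_add_mod s n
    have hge : 0 ≤ r := PySem.Int.mod_nonneg s (by omega)
    have hltn : r < n := PySem.Int.mod_lt s (by omega)
    have hq1 : 1 ≤ q := by
      by_contra hc
      push_neg at hc
      have : q * n ≤ 0 * n := by
        apply mul_le_mul_of_nonneg_right (by omega) (by omega)
      omega
    have hn1 : n - 1 = (m : Int) + 1 := by omega
    have hrec : (m : Int) + 1 ≤ s - q := by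
      have e1 : q * n = q * (n - 1) + q := by ring
      have e2 : 1 * (n - 1) ≤ q * (n - 1) :=
        mul_le_mul_of_nonneg_right hq1 (by omega)
      omega
    have hstep := pvStep n s h2 (by omega)
    by_cases hcase : r = n - 1
    · obtain ⟨hfd', hmod'⟩ := hstep.2 (by omega)
      rw [show n - 1 = (m : Int) + 1 from hn1] at hfd' hmod'
      rw [hn1, ih (s - q) (acc ++ [q]) hrec, hfd', hmod']
      have h1 : ((m : Int) + 1 - 0).toNat = ((m : Int) + 1).toNat := by omega
      have h2' : (n - r).toNat = 1 := by omega
      have h3 : r.toNat = ((m : Int) + 1).toNat := by omega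
      rw [h1, h2', h3]
      simp
      exact hq.symm
    · obtain ⟨hfd', hmod'⟩ := hstep.1 (by omega)
      rw [show n - 1 = (m : Int) + 1 from hn1] at hfd' hmod'
      rw [hn1, ih (s - q) (acc ++ [q]) hrec, hfd', hmod']
      have h1 : (n - r).toNat = ((m : Int) + 1 - r).toNat + 1 := by omega
      rw [h1, List.replicate_succ]
      simp
      rw [← hq, ← hr]

-- ===== VERDICT (by name: the statement is the Claim_ definition above) =====
theorem solution_spec : Claim_equal_solution := by
  intro n s _ hpre
  unfold Spec_solution solution_alt
  by_cases hlt : s < n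
  · unfold solution
    rw [if_pos hlt, if_pos hlt]
  · rw [if_neg hlt]
    have hn : n ≠ 0 := by rcases hpre with h | h; exacts [h, absurd h hlt]
    rcases lt_or_gt_of_ne hn with hneg | hpos
    · -- n < 0: A returns the sort of the (possibly incremented) empty fill, B's loop never runs
      rw [pvGreedy, dif_neg (by omega)]
      unfold solution
      rw [if_neg hlt]
      simp only []
      rw [pvFill_eq_replicate]
      have h1 : n.toNat = 0 := by omega
      by_cases hr0 : PySem.Int.mod s n ≠ 0 <;>
        simp [hr0, h1, pvIncLoop, PySem.List.sorted]
    · -- n > 0: both equal the closed form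
      have hm : n = ((n.toNat - 1 : Nat) : Int) + 1 := by omega
      rw [pvA_closed n s hpos (by omega)]
      rw [hm, pvGreedy_closed (n.toNat - 1) s [] (by omega)]
      simp
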